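-- pv_equiv track=rewrite | github.com/tmheo/ax-content-hub | src/agent/domains/processor/tools/summarizer_tool.py | _truncate_summary
-- ===== SOURCE A (Python) =====
-- def _truncate_summary(summary: str, max_sentences: int = 3) -> str:
--     """요약 문장 수 제한."""
--     # 마침표로 문장 분리
--     sentences = []
--     current = ""
--
--     for char in summary:
--         current += char
--         if char in ".!?。":
--             sentences.append(current.strip())
--             current = ""
--
--     if current.strip():
--         sentences.append(current.strip())
--
--     # 최대 문장 수로 제한
--     limited = sentences[:max_sentences]
--
--     return " ".join(limited)
-- ===== SOURCE B (Python) =====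
-- def _truncate_summary(summary: str, max_sentences: int = 3) -> str:
--     # One pass over indices: record delimiter positions and cut sentences out
--     # of the original string by slicing, then strip/filter/join.
--     pieces = []
--     start = 0
--     for i, ch in enumerate(summary):
--         if ch in ".!?。":
--             pieces.append(summary[start:i + 1])
--             start = i + 1
--     pieces.append(summary[start:])
--     cleaned = [p.strip() for p in pieces if p.strip()]
--     return " ".join(cleaned[:max_sentences])
-- ===== Notes on version B (the rewrite author's own statement) =====
-- stated objective: alternative
-- what changed: Replaces the char-by-char accumulation of an in-progress sentence string with a single index pass that records delimiter positions and slices each sentence out of the original string, then strips, filters empties and joins.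
import Mathlib
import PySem

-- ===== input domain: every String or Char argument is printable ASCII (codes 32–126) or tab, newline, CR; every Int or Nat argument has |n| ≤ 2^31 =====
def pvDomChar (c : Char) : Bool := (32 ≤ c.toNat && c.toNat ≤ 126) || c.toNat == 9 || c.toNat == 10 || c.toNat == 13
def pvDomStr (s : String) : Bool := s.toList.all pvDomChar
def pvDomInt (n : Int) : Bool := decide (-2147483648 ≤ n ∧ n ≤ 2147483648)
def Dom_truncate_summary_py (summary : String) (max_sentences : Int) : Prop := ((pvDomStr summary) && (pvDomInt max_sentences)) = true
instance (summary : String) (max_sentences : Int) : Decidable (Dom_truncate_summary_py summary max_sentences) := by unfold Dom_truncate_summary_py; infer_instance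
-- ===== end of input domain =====

-- B replaces A's char-by-char string accumulation with an index pass that slices
-- each sentence out of the original string, then strips/filters/joins (alternative
-- decomposition, same cost).

-- ===== PORT A =====
def pvDelims : List Char := ['.', '!', '?', '。']

def truncate_summary_py (summary : String) (max_sentences : Int) : String :=
  let st := summary.toList.foldl
    (fun (acc : List (List Char) × List Char) c =>
      let current := acc.2 ++ [c]
      if c ∈ pvDelims then (acc.1 ++ [PySem.Chars.strip current], []) else (acc.1, current))
    ([], [])
  let sentences := if PySem.Chars.strip st.2 ≠ [] then st.1 ++ [PySem.Chars.strip st.2] else st.1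
  String.ofList (PySem.Chars.join [' '] (PySem.List.slice sentences none (some max_sentences)))

-- ===== PORT B =====
def truncate_summary_py_alt (summary : String) (max_sentences : Int) : String :=
  let cs := summary.toList
  let st := (PySem.List.enumerate cs).foldl
    (fun (acc : List (List Char) × Int) p =>
      if p.2 ∈ pvDelims then (acc.1 ++ [PySem.List.slice cs (some acc.2) (some (p.1 + 1))], p.1 + 1)
      else acc)
    ([], 0)
  let pieces := st.1 ++ [PySem.List.slice cs (some st.2) none]
  let cleaned := (pieces.filter (fun p => !(PySem.Chars.strip p).isEmpty)).map PySem.Chars.strip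
  String.ofList (PySem.Chars.join [' '] (PySem.List.slice cleaned none (some max_sentences)))

-- ===== PRECONDITION & SPEC =====
def Spec_truncate_summary_py (summary : String) (max_sentences : Int) (out : String) : Prop := out = truncate_summary_py_alt summary max_sentences
instance (summary : String) (max_sentences : Int) (out : String) : Decidable (Spec_truncate_summary_py summary max_sentences out) := by unfold Spec_truncate_summary_py; infer_instance

-- ===== CLAIM (what is proved, stated in full; the proofs are below) =====
def Claim_equal_truncate_summary_py : Prop := ∀ (summary : String) (max_sentences : Int), Dom_truncate_summary_py summary max_sentences → Spec_truncate_summary_py summary max_sentences (truncate_summary_py summary max_sentences)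

-- ===== LEMMAS AND PROOFS =====

-- a list containing a non-space character does not strip to empty
theorem strip_ne_nil_of_mem {l : List Char} {c : Char}
    (hc : c ∈ l) (hs : PySem.Chars.isspace c = false) : PySem.Chars.strip l ≠ [] := by
  intro h
  unfold PySem.Chars.strip PySem.Chars.rstrip PySem.Chars.lstrip at h
  have h' : List.dropWhile PySem.Chars.isspace
      (List.dropWhile PySem.Chars.isspace l).reverse = [] := by
    simpa using h
  rw [List.dropWhile_eq_nil_iff] at h'
  have hmem : c ∈ List.dropWhile PySem.Chars.isspace l := by
    have hsplit := List.takeWhile_append_dropWhile (p := PySem.Chars.isspace) (l := l)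
    rw [← hsplit] at hc
    rcases List.mem_append.mp hc with h1 | h2
    · exact absurd (List.mem_takeWhile_imp h1) (by simp [hs])
    · exact h2
  have := h' c (by simpa using hmem)
  simp [hs] at this

-- the two loops, related step by step
theorem loop_rel (cs : List Char) :
    ∀ (rest : List Char) (start : Nat) (cur : List Char) (sA pB : List (List Char)),
    cs.drop start = cur ++ rest →
    sA = pB.map PySem.Chars.strip →
    (∀ p ∈ pB, PySem.Chars.strip p ≠ []) →
    let rA := rest.foldl
      (fun (acc : List (List Char) × List Char) c =>
        let current := acc.2 ++ [c]
        if c ∈ pvDelims then (acc.1 ++ [PySem.Chars.strip current], []) else (acc.1, current))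
      (sA, cur)
    let rB := (PySem.List.enumerate rest ((start + cur.length : Nat) : Int)).foldl
      (fun (acc : List (List Char) × Int) p =>
        if p.2 ∈ pvDelims then (acc.1 ++ [PySem.List.slice cs (some acc.2) (some (p.1 + 1))], p.1 + 1)
        else acc)
      (pB, (start : Int))
    ∃ start' : Nat, rB.2 = (start' : Int) ∧ rA.1 = rB.1.map PySem.Chars.strip ∧
      cs.drop start' = rA.2 ∧ (∀ p ∈ rB.1, PySem.Chars.strip p ≠ []) := by
  intro rest
  induction rest with
  | nil =>
    intro start cur sA pB hdrop hmap hinv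
    exact ⟨start, rfl, hmap, by simpa using hdrop, hinv⟩
  | cons c rest' ih =>
    intro start cur sA pB hdrop hmap hinv
    simp only [PySem.List.enumerate_cons, List.foldl_cons]
    by_cases hc : c ∈ pvDelims
    · simp only [hc, if_pos]
      -- slice cs start (start+cur.length+1) = cur ++ [c]
      have hslice : PySem.List.slice cs (some (start : Int))
          (some (((start + cur.length : Nat) : Int) + 1)) = cur ++ [c] := by
        have hcast : (((start + cur.length : Nat) : Int) + 1) = ((start + cur.length + 1 : Nat) : Int) := by
          push_cast; ring
        rw [hcast, PySem.List.slice_natCast]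
        have h1 : cs.drop start = (cur ++ [c]) ++ rest' := by
          simpa using hdrop
        rw [h1]
        have h2 : start + cur.length + 1 - start = (cur ++ [c]).length := by
          simp only [List.length_append, List.length_cons, List.length_nil]
          omega
        rw [h2, List.take_left]
      have hdrop' : cs.drop (start + cur.length + 1) = rest' := by
        have h2 : cs.drop (start + cur.length) = c :: rest' := by
          have h3 := congrArg (List.drop cur.length) hdrop
          rw [List.drop_drop] at h3
          simpa [Nat.add_comm] using h3
        have h4 := congrArg (List.drop 1) h2
        rw [List.drop_drop] at h4
        simpa [Nat.add_comm] using h4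
      have hnotspace : PySem.Chars.isspace c = false := by
        fin_cases hc <;> decide
      have hstrip : PySem.Chars.strip (cur ++ [c]) ≠ [] :=
        strip_ne_nil_of_mem (by simp) hnotspace
      have key := ih (start + cur.length + 1) []
        (sA ++ [PySem.Chars.strip (cur ++ [c])])
        (pB ++ [cur ++ [c]])
        (by simpa using hdrop')
        (by simp [hmap])
        (by intro p hp
            rcases List.mem_append.mp hp with h1 | h2
            · exact hinv p h1
            · simp at h2; subst h2; exact hstrip)
      push_cast at key hslice ⊢
      simpa [hslice] using key
    · simp only [hc, if_false]
      have key := ih start (cur ++ [c]) sA pB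
        (by simpa using hdrop) hmap hinv
      push_cast at key ⊢
      simpa using key

theorem truncate_eq (summary : String) (max_sentences : Int) :
    truncate_summary_py summary max_sentences = truncate_summary_py_alt summary max_sentences := by
  unfold truncate_summary_py truncate_summary_py_alt
  dsimp only
  have h := loop_rel summary.toList summary.toList 0 [] [] []
    (by simp) (by simp) (by simp)
  simp only [Nat.cast_zero, List.length_nil, Nat.add_zero] at h
  obtain ⟨start', hst, hmap, hlast, hinv⟩ := h
  set rA := summary.toList.foldl
      (fun (acc : List (List Char) × List Char) c =>
        let current := acc.2 ++ [c]
        if c ∈ pvDelims then (acc.1 ++ [PySem.Chars.strip current], []) else (acc.1, current))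
      ([], []) with hrA
  set rB := (PySem.List.enumerate summary.toList).foldl
      (fun (acc : List (List Char) × Int) p =>
        if p.2 ∈ pvDelims then (acc.1 ++ [PySem.List.slice summary.toList (some acc.2) (some (p.1 + 1))], p.1 + 1)
        else acc)
      ([], 0) with hrB
  -- B's trailing slice is A's leftover 'current'
  have htail : PySem.List.slice summary.toList (some rB.2) none = rA.2 := by
    rw [hst, PySem.List.slice_from_natCast, hlast]
  -- the filtered+stripped pieces equal A's sentence list
  have hsent : (if PySem.Chars.strip rA.2 ≠ [] then rA.1 ++ [PySem.Chars.strip rA.2] else rA.1)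
      = ((rB.1 ++ [PySem.List.slice summary.toList (some rB.2) none]).filter
          (fun p => !(PySem.Chars.strip p).isEmpty)).map PySem.Chars.strip := by
    rw [htail, List.filter_append, List.map_append]
    have hfilt : rB.1.filter (fun p => !(PySem.Chars.strip p).isEmpty) = rB.1 := by
      apply List.filter_eq_self.mpr
      intro p hp
      simpa [List.isEmpty_iff] using hinv p hp
    rw [hfilt, ← hmap]
    by_cases hne : PySem.Chars.strip rA.2 = []
    · simp [hne]
    · simp [hne]
  rw [hsent]

-- ===== VERDICT (by name: the statement is the Claim_ definition above) =====
theorem truncate_summary_py_spec : Claim_equal_truncate_summary_py := by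
  intro summary max_sentences _
  unfold Spec_truncate_summary_py
  exact truncate_eq summary max_sentences
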